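-- pv_equiv track=rewrite | github.com/iwataka/google-code-jam | 2018/qualification_round/trouble_sort/main.py | solve
-- ===== SOURCE A (Python) =====
-- def solve(arr):
--     evenArr = [x for i, x in enumerate(arr) if i % 2 == 0]
--     oddArr = [x for i, x in enumerate(arr) if i % 2 == 1]
--     evenArr = sorted(evenArr)
--     oddArr = sorted(oddArr)
--     for i in range(len(arr) - 1):
--         if i % 2 == 0:
--             even = i // 2
--             odd = i // 2
--             if evenArr[even] > oddArr[odd]:
--                 return i
--         elif i % 2 == 1:
--             odd = (i - 1) // 2
--             even = (i + 1) // 2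
--             if oddArr[odd] > evenArr[even]:
--                 return i
--     return None
-- ===== SOURCE B (Python) =====
-- def solve(arr):
--     merged = [0] * len(arr)
--     merged[0::2] = sorted(arr[0::2])
--     merged[1::2] = sorted(arr[1::2])
--     for i, (x, y) in enumerate(zip(merged, sorted(arr))):
--         if x != y:
--             return i
--     return None
-- ===== Notes on version B (the rewrite author's own statement) =====
-- stated objective: alternative
-- what changed: B never compares adjacent elements: it materializes the interleaved sorted-halves sequence, also fully sorts arr, and returns the index of the first position where the two differ (for an interleaving of two sorted subsequences, the first mismatch with the global sort is exactly the first adjacent inversion, None when equal).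
import Mathlib
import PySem

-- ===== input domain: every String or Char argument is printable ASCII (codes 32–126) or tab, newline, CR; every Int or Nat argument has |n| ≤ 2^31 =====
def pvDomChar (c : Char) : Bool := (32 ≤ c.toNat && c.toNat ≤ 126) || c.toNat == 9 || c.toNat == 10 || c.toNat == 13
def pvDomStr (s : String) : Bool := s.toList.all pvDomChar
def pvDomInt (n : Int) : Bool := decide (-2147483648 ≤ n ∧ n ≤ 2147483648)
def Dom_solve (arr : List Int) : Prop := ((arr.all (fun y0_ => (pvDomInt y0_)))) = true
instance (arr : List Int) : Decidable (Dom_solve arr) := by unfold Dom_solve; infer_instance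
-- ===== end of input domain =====

-- B replaces A's adjacent-pair comparisons entirely: it builds the trouble-sorted sequence and
-- returns the first index where it differs from the fully sorted array (objective: alternative).

-- ===== PORT A =====
-- the loop 'for i in range(len(arr)-1): …' (the indices A uses are provably in range, so pyGetD is exact here)
def solveLoopA (evenArr oddArr : List Int) : List Int → Option Int
  | [] => none
  | i :: rest =>
    if PySem.Int.mod i 2 == 0 then
      let even := PySem.Int.floordiv i 2
      let odd := PySem.Int.floordiv i 2
      if PySem.List.pyGetD evenArr even 0 > PySem.List.pyGetD oddArr odd 0 then some i
      else solveLoopA evenArr oddArr rest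
    else if PySem.Int.mod i 2 == 1 then
      let odd := PySem.Int.floordiv (i - 1) 2
      let even := PySem.Int.floordiv (i + 1) 2
      if PySem.List.pyGetD oddArr odd 0 > PySem.List.pyGetD evenArr even 0 then some i
      else solveLoopA evenArr oddArr rest
    else solveLoopA evenArr oddArr rest

def solve (arr : List Int) : Option Int :=
  let evenArr := ((PySem.List.enumerate arr).filter (fun p => PySem.Int.mod p.1 2 == 0)).map Prod.snd
  let oddArr := ((PySem.List.enumerate arr).filter (fun p => PySem.Int.mod p.1 2 == 1)).map Prod.snd
  let evenArr := PySem.List.sorted evenArr (fun x => x)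
  let oddArr := PySem.List.sorted oddArr (fun x => x)
  solveLoopA evenArr oddArr (PySem.List.pyRange 0 ((arr.length : Int) - 1) 1)

-- ===== PORT B =====
-- arr[0::2] (step-2 slice from the front; exact hand port of the slice)
def everyOther : List Int → List Int
  | [] => []
  | [x] => [x]
  | x :: _ :: rest => x :: everyOther rest

-- merged = [0]*n; merged[0::2] = e; merged[1::2] = o  (the slice assignments materialized;
-- exact since Source B's two slices have lengths ⌈n/2⌉ and ⌊n/2⌋)
def interleave : List Int → List Int → List Int
  | [], ys => ys
  | x :: xs, ys => x :: interleave ys xs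
termination_by e o => e.length + o.length
decreasing_by simp; omega

-- 'for i, (x, y) in enumerate(zip(merged, sorted(arr))): if x != y: return i'
def firstDiff (i : Int) : List (Int × Int) → Option Int
  | [] => none
  | (x, y) :: rest => if x ≠ y then some i else firstDiff (i + 1) rest

def solve_alt (arr : List Int) : Option Int :=
  let merged := interleave (PySem.List.sorted (everyOther arr) (fun x => x))
                           (PySem.List.sorted (everyOther (arr.drop 1)) (fun x => x))
  firstDiff 0 (merged.zip (PySem.List.sorted arr (fun x => x)))

-- ===== PRECONDITION & SPEC =====
def Spec_solve (arr : List Int) (out : Option Int) : Prop := out = solve_alt arr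
instance (arr : List Int) (out : Option Int) : Decidable (Spec_solve arr out) := by unfold Spec_solve; infer_instance

-- ===== CLAIM =====
def Claim_equal_solve : Prop := ∀ (arr : List Int), Dom_solve arr → Spec_solve arr (solve arr)

-- ===== LEMMAS AND PROOFS =====

-- proof-side device: the first adjacent inversion of a list (what A's loop computes on merged)
def scanAdj (i : Int) : List Int → Option Int
  | a :: b :: rest => if a > b then some i else scanAdj (i + 1) (b :: rest)
  | _ => none

lemma mod_two_emod (t : Int) : PySem.Int.mod t 2 = t % 2 :=
  PySem.Int.mod_eq_emod_of_pos (by omega)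

lemma everyOther_cons (x : Int) (xs : List Int) :
    everyOther (x :: xs) = x :: everyOther (xs.drop 1) := by
  cases xs <;> simp [everyOther]

-- A's even-index comprehension is B's step-2 slice
lemma filter_enumerate_even (arr : List Int) : ∀ s : Int,
    (((PySem.List.enumerate arr s).filter (fun p => PySem.Int.mod p.1 2 == 0)).map Prod.snd)
      = if PySem.Int.mod s 2 = 0 then everyOther arr else everyOther (arr.drop 1) := by
  induction arr with
  | nil => intro s; simp [PySem.List.enumerate_nil, everyOther]
  | cons x xs ih =>
    intro s
    rw [PySem.List.enumerate_cons]
    simp only [mod_two_emod] at *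
    rcases (by omega : s % 2 = 0 ∨ s % 2 = 1) with h | h
    · rw [List.filter_cons_of_pos (by simp [h]), if_pos h]
      rw [List.map_cons, ih (s + 1), if_neg (by omega), everyOther_cons]
    · rw [List.filter_cons_of_neg (by simp [h]), if_neg (by omega)]
      rw [ih (s + 1), if_pos (by omega)]
      cases xs <;> simp [everyOther]

-- A's odd-index comprehension is B's step-2 slice of the tail
lemma filter_enumerate_odd (arr : List Int) : ∀ s : Int,
    (((PySem.List.enumerate arr s).filter (fun p => PySem.Int.mod p.1 2 == 1)).map Prod.snd)
      = if PySem.Int.mod s 2 = 1 then everyOther arr else everyOther (arr.drop 1) := by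
  induction arr with
  | nil => intro s; simp [PySem.List.enumerate_nil, everyOther]
  | cons x xs ih =>
    intro s
    rw [PySem.List.enumerate_cons]
    simp only [mod_two_emod] at *
    rcases (by omega : s % 2 = 0 ∨ s % 2 = 1) with h | h
    · rw [List.filter_cons_of_neg (by simp [h]), if_neg (by omega)]
      rw [ih (s + 1), if_pos (by omega)]
      cases xs <;> simp [everyOther]
    · rw [List.filter_cons_of_pos (by simp [h]), if_pos h]
      rw [List.map_cons, ih (s + 1), if_neg (by omega), everyOther_cons]

lemma length_everyOther : ∀ arr : List Int, (everyOther arr).length = (arr.length + 1) / 2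
  | [] => rfl
  | [_] => by simp [everyOther]
  | _ :: _ :: rest => by
      simp [everyOther, length_everyOther rest]; omega

lemma length_interleave : ∀ e o : List Int, (interleave e o).length = e.length + o.length
  | [], o => by rw [interleave]; simp
  | x :: xs, o => by rw [interleave]; simp [length_interleave o xs]; omega
termination_by e o => e.length + o.length
decreasing_by simp; omega

-- the merged list read back: even positions come from e, odd positions from o
lemma getD_interleave : ∀ (j : Nat) (e o : List Int),
    o.length ≤ e.length → e.length ≤ o.length + 1 →
    (interleave e o).getD j 0
      = if j % 2 = 0 then e.getD (j / 2) 0 else o.getD (j / 2) 0 := by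
  intro j
  induction j using Nat.strong_induction_on with
  | _ j ih =>
    intro e o h1 h2
    match j, e with
    | 0, [] =>
      have : o = [] := by cases o <;> simp_all
      subst this; rw [interleave]; simp
    | 0, x :: xs => rw [interleave]; simp
    | (j+1), [] =>
      have : o = [] := by cases o <;> simp_all
      subst this; rw [interleave]; simp
    | (j+1), x :: xs =>
      rw [interleave]
      simp only [List.getD_cons_succ]
      rw [ih j (by omega) o xs (by simpa using h2) (by simpa using h1)]
      rcases (by omega : j % 2 = 0 ∨ j % 2 = 1) with h | h
      · rw [if_pos h, if_neg (by omega)]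
        congr 1; omega
      · rw [if_neg (by omega), if_pos (by omega)]
        have : (j + 1) / 2 = j / 2 + 1 := by omega
        simp [this]

lemma scanAdj_short (i : Int) (l : List Int) (h : l.length ≤ 1) : scanAdj i l = none := by
  match l with
  | [] => rfl
  | [_] => rfl
  | _ :: _ :: _ => simp at h

-- main loop correspondence: A's indexed loop from k equals the adjacent scan of merged from k
lemma loopEq (e o : List Int) (n : Nat)
    (he : e.length = (n + 1) / 2) (ho : o.length = n / 2) :
    ∀ (t k : Nat), n ≤ k + t + 1 →
      solveLoopA e o (PySem.List.pyRange (k : Int) ((n : Int) - 1) 1)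
        = scanAdj (k : Int) ((interleave e o).drop k) := by
  have hm : (interleave e o).length = n := by rw [length_interleave]; omega
  intro t
  induction t with
  | zero =>
    intro k hk
    rw [PySem.List.pyRange_one_eq_nil (by omega)]
    rw [scanAdj_short _ _ (by simp [hm]; omega)]
    rfl
  | succ t ih =>
    intro k hk
    by_cases hend : n ≤ k + 1
    · rw [PySem.List.pyRange_one_eq_nil (by omega)]
      rw [scanAdj_short _ _ (by simp [hm]; omega)]
      rfl
    · rw [PySem.List.pyRange_one_cons (by omega)]
      have hk1 : k < (interleave e o).length := by omega
      have hk2 : k + 1 < (interleave e o).length := by omega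
      have hget1 : (interleave e o)[k] = (interleave e o).getD k 0 := (List.getD_eq_getElem _ _ hk1).symm
      have hget2 : (interleave e o)[k+1] = (interleave e o).getD (k+1) 0 := (List.getD_eq_getElem _ _ hk2).symm
      have hIL1 := getD_interleave k e o (by omega) (by omega)
      have hIL2 := getD_interleave (k+1) e o (by omega) (by omega)
      rw [List.drop_eq_getElem_cons hk1, List.drop_eq_getElem_cons hk2, scanAdj]
      rw [← List.drop_eq_getElem_cons hk2]
      have hmod : PySem.Int.mod (k : Int) 2 = ((k % 2 : Nat) : Int) := by
        rw [mod_two_emod]; omega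
      have harr : ((k : Int) + 1) = ((k + 1 : Nat) : Int) := by push_cast; ring
      rcases (by omega : k % 2 = 0 ∨ k % 2 = 1) with h | h
      · rw [solveLoopA]
        simp only [hmod, h]
        rw [if_pos (by decide)]
        have hd : PySem.Int.floordiv (k : Int) 2 = ((k / 2 : Nat) : Int) := by
          rw [PySem.Int.floordiv_eq_ediv_of_pos (by omega)]; omega
        simp only [hd, PySem.List.pyGetD_natCast]
        rw [if_pos h] at hIL1
        have h12 : (k + 1) / 2 = k / 2 := by omega
        rw [if_neg (by omega), h12] at hIL2
        rw [hget1, hget2, hIL1, hIL2]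
        split_ifs with hc
        · rfl
        · rw [harr]; exact ih (k + 1) (by omega)
      · rw [solveLoopA]
        simp only [hmod, h]
        rw [if_neg (by decide), if_pos (by decide)]
        have hd1 : PySem.Int.floordiv ((k : Int) - 1) 2 = ((k / 2 : Nat) : Int) := by
          rw [PySem.Int.floordiv_eq_ediv_of_pos (by omega)]; omega
        have hd2 : PySem.Int.floordiv ((k : Int) + 1) 2 = (((k + 1) / 2 : Nat) : Int) := by
          rw [PySem.Int.floordiv_eq_ediv_of_pos (by omega)]; omega
        simp only [hd1, hd2, PySem.List.pyGetD_natCast]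
        rw [if_neg (by omega)] at hIL1
        rw [if_pos (by omega)] at hIL2
        rw [hget1, hget2, hIL1, hIL2]
        split_ifs with hc
        · rfl
        · rw [harr]; exact ih (k + 1) (by omega)

-- ===== B-side lemmas: first mismatch with the global sort = first adjacent inversion =====

lemma interleave_perm_append : ∀ e o : List Int, (interleave e o).Perm (e ++ o)
  | [], o => by rw [interleave]; simp
  | x :: xs, o => by
      rw [interleave]
      show (x :: interleave o xs).Perm (x :: (xs ++ o))
      exact ((interleave_perm_append o xs).trans List.perm_append_comm).cons x
termination_by e o => e.length + o.length
decreasing_by simp; omega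

lemma everyOther_perm : ∀ l : List Int, (everyOther l ++ everyOther (l.drop 1)).Perm l
  | [] => by simp [everyOther]
  | [x] => by simp [everyOther]
  | x :: y :: rest => by
      have ih := everyOther_perm rest
      rw [List.drop_one] at ih
      simp only [everyOther, List.drop_one, List.tail_cons, everyOther_cons y rest]
      exact (List.perm_middle.trans (ih.cons y)).cons x

lemma pairwise_getD_mono (l : List Int) (h : l.Pairwise (· ≤ ·)) (p q : Nat)
    (hpq : p ≤ q) (hq : q < l.length) : l.getD p 0 ≤ l.getD q 0 := by
  rcases Nat.lt_or_ge p q with hlt | hge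
  · rw [List.getD_eq_getElem _ _ (by omega), List.getD_eq_getElem _ _ hq]
    exact List.pairwise_iff_getElem.mp h p q (by omega) hq hlt
  · have : p = q := by omega
    subst this
    exact le_refl _

-- monotone prefix from adjacent nondecrease up to r
lemma adj_mono (m : List Int) (r : Nat)
    (h : ∀ t, t + 1 ≤ r → m.getD t 0 ≤ m.getD (t + 1) 0) :
    ∀ p q, p ≤ q → q ≤ r → m.getD p 0 ≤ m.getD q 0 := by
  intro p q
  induction q with
  | zero =>
    intro hpq _
    have : p = 0 := by omega
    subst this
    exact le_refl _
  | succ q ih =>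
    intro hpq hqr
    rcases Nat.lt_or_ge p (q + 1) with hlt | hge
    · exact le_trans (ih (by omega) (by omega)) (h q hqr)
    · have : p = q + 1 := by omega
      subst this
      exact le_refl _

-- a same-parity step in merged is a step within sorted e or sorted o
lemma interleave_step (e o : List Int) (he : e.Pairwise (· ≤ ·)) (ho : o.Pairwise (· ≤ ·))
    (h1 : o.length ≤ e.length) (h2 : e.length ≤ o.length + 1) (q : Nat) (hq2 : 2 ≤ q)
    (hqn : q < (interleave e o).length) :
    (interleave e o).getD (q - 2) 0 ≤ (interleave e o).getD q 0 := by
  have hlen := length_interleave e o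
  rw [getD_interleave (q - 2) e o h1 h2, getD_interleave q e o h1 h2]
  rcases (by omega : q % 2 = 0 ∨ q % 2 = 1) with h | h
  · rw [if_pos h, if_pos (by omega)]
    exact pairwise_getD_mono e he _ _ (by omega) (by omega)
  · rw [if_neg (by omega), if_neg (by omega)]
    exact pairwise_getD_mono o ho _ _ (by omega) (by omega)

-- past the first inversion everything stays ≥ merged[j-1] (parity chains through e and o)
lemma interleave_ge (e o : List Int) (he : e.Pairwise (· ≤ ·)) (ho : o.Pairwise (· ≤ ·))
    (h1 : o.length ≤ e.length) (h2 : e.length ≤ o.length + 1) (j : Nat) (hj : 1 ≤ j)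
    (hadj : ∀ t, t + 1 ≤ j → (interleave e o).getD t 0 ≤ (interleave e o).getD (t + 1) 0) :
    ∀ q, j ≤ q → q < (interleave e o).length →
      (interleave e o).getD (j - 1) 0 ≤ (interleave e o).getD q 0 := by
  intro q
  induction q using Nat.strong_induction_on with
  | _ q ih =>
    intro hjq hqn
    rcases Nat.eq_or_lt_of_le hjq with heq | hlt
    · have h := hadj (q - 1) (by omega)
      have hq1 : q - 1 + 1 = q := by omega
      rw [hq1] at h
      have hj1 : j - 1 = q - 1 := by omega
      rw [hj1]
      exact h
    · have hstep := interleave_step e o he ho h1 h2 q (by omega) hqn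
      rcases Nat.lt_or_ge (q - 2) j with hc | hc
      · have : q - 2 = j - 1 := by omega
        rwa [this] at hstep
      · exact le_trans (ih (q - 2) (by omega) hc (by omega)) hstep

lemma firstDiff_refl : ∀ (m : List Int) (k : Int), firstDiff k (m.zip m) = none
  | [], _ => rfl
  | x :: xs, k => by
      rw [List.zip_cons_cons, firstDiff, if_neg (by simp)]
      exact firstDiff_refl xs (k + 1)

lemma firstDiff_some : ∀ (j : Nat) (m s : List Int) (k : Int), j < m.length → j < s.length →
    m.getD j 0 ≠ s.getD j 0 → (∀ t, t < j → m.getD t 0 = s.getD t 0) →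
    firstDiff k (m.zip s) = some (k + j) := by
  intro j
  induction j with
  | zero =>
    intro m s k hm hs hne _
    match m, s with
    | a :: m', b :: s' =>
      rw [List.zip_cons_cons, firstDiff, if_pos (by simpa using hne)]
      norm_num
  | succ j ih =>
    intro m s k hm hs hne hpre
    match m, s with
    | a :: m', b :: s' =>
      have hab : a = b := by simpa using hpre 0 (by omega)
      rw [List.zip_cons_cons, firstDiff, if_neg (by simp [hab])]
      have := ih m' s' (k + 1) (by simpa using hm) (by simpa using hs)
        (by simpa using hne) (fun t ht => by simpa using hpre (t + 1) (by omega))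
      rw [this]; congr 1; push_cast; ring

lemma scanAdj_none : ∀ (m : List Int) (k : Int),
    (∀ t, t + 1 < m.length → m.getD t 0 ≤ m.getD (t + 1) 0) → scanAdj k m = none := by
  intro m
  induction m with
  | nil => intro k _; rfl
  | cons a tail ih =>
    intro k h
    match tail, ih with
    | [], _ => rfl
    | b :: rest, ih =>
      rw [scanAdj, if_neg (by simpa using not_lt.mpr (by simpa using h 0 (by simp)))]
      exact ih (k + 1) (fun t ht => by simpa using h (t + 1) (by simpa using ht))

lemma scanAdj_some : ∀ (j : Nat) (m : List Int) (k : Int), j + 1 < m.length →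
    m.getD (j + 1) 0 < m.getD j 0 → (∀ t, t < j → m.getD t 0 ≤ m.getD (t + 1) 0) →
    scanAdj k m = some (k + j) := by
  intro j
  induction j with
  | zero =>
    intro m k hlen hinv _
    match m with
    | a :: b :: rest =>
      rw [scanAdj, if_pos (by simpa using hinv)]
      norm_num
  | succ j ih =>
    intro m k hlen hinv hpre
    match m with
    | a :: b :: rest =>
      rw [scanAdj, if_neg (by simpa using not_lt.mpr (by simpa using hpre 0 (by omega)))]
      have := ih (b :: rest) (k + 1) (by simpa using hlen) (by simpa using hinv)
        (fun t ht => by simpa using hpre (t + 1) (by omega))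
      rw [this]; congr 1; push_cast; ring

-- the crux: for an interleaving of two sorted lists, the first adjacent inversion
-- is exactly the first position where the list differs from its full sort
lemma scanAdj_eq_firstDiff (e o : List Int)
    (he : e.Pairwise (· ≤ ·)) (ho : o.Pairwise (· ≤ ·))
    (h1 : o.length ≤ e.length) (h2 : e.length ≤ o.length + 1) :
    scanAdj 0 (interleave e o)
      = firstDiff 0 ((interleave e o).zip (PySem.List.sorted (interleave e o) (fun x => x))) := by
  set m := interleave e o with hm
  by_cases hmono : ∀ t, t + 1 < m.length → m.getD t 0 ≤ m.getD (t + 1) 0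
  · rw [scanAdj_none m 0 hmono]
    have hpw : m.Pairwise (· ≤ ·) := by
      rw [List.pairwise_iff_getElem]
      intro p q hp hq hpq
      rw [← List.getD_eq_getElem m 0 hp, ← List.getD_eq_getElem m 0 hq]
      exact adj_mono m (m.length - 1) (fun t ht => hmono t (by omega)) p q (by omega) (by omega)
    rw [PySem.List.sorted_id_eq_of_perm_of_pairwise m m (List.Perm.refl m) hpw, firstDiff_refl]
  · push_neg at hmono
    have hex : ∃ t, t + 1 < m.length ∧ m.getD (t + 1) 0 < m.getD t 0 := by
      obtain ⟨t, ht1, ht2⟩ := hmono; exact ⟨t, ht1, ht2⟩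
    classical
    let j := Nat.find hex
    obtain ⟨hjlen, hjinv⟩ : j + 1 < m.length ∧ m.getD (j + 1) 0 < m.getD j 0 := Nat.find_spec hex
    have hjmin : ∀ t, t < j → m.getD t 0 ≤ m.getD (t + 1) 0 := by
      intro t ht
      have := Nat.find_min hex ht
      push_neg at this
      exact this (by omega)
    rw [scanAdj_some j m 0 hjlen hjinv hjmin]
    -- the sorted list starts with m.take j, then the sort of the rest
    have htke : (m.take j).length = j := by rw [List.length_take]; omega
    have hcross : ∀ x ∈ m.take j, ∀ y ∈ PySem.List.sorted (m.drop j) (fun x => x), x ≤ y := by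
      intro x hx y hy
      have hy' : y ∈ m.drop j := by
        exact (PySem.List.mem_sorted _ _ _ _).mp hy
      obtain ⟨p, hp, rfl⟩ := List.mem_take_iff_getElem.mp hx
      obtain ⟨qd, hqd, rfl⟩ := List.mem_iff_getElem.mp hy'
      have hple : p < j := by omega
      have hj1 : 1 ≤ j := by omega
      have hqd' : j + qd < m.length := by
        have := List.length_drop (i := j) (l := m); omega
      have e1 : m[p]'(by omega) = m.getD p 0 := (List.getD_eq_getElem m 0 (by omega)).symm
      have e2 : (m.drop j)[qd]'hqd = m.getD (j + qd) 0 := by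
        rw [List.getElem_drop]
        exact (List.getD_eq_getElem m 0 hqd').symm
      rw [e1, e2]
      calc m.getD p 0 ≤ m.getD (j - 1) 0 :=
            adj_mono m j (fun t ht => hjmin t (by omega)) p (j - 1) (by omega) (by omega)
        _ ≤ m.getD (j + qd) 0 :=
            interleave_ge e o he ho h1 h2 j hj1 (fun t ht => hjmin t (by omega)) (j + qd) (by omega) hqd'
    have htpw : (m.take j).Pairwise (· ≤ ·) := by
      rw [List.pairwise_iff_getElem]
      intro p q hp hq hpq
      rw [List.getElem_take, List.getElem_take]
      rw [← List.getD_eq_getElem m 0, ← List.getD_eq_getElem m 0]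
      exact adj_mono m j (fun t ht => hjmin t (by omega)) p q (by omega) (by omega)
    have hsorted : PySem.List.sorted m (fun x => x)
        = m.take j ++ PySem.List.sorted (m.drop j) (fun x => x) := by
      apply PySem.List.sorted_id_eq_of_perm_of_pairwise m (m.take j ++ PySem.List.sorted (m.drop j) (fun x => x))
      · calc (m.take j ++ PySem.List.sorted (m.drop j) (fun x => x)).Perm
              (m.take j ++ m.drop j) := List.Perm.append_left _ (PySem.List.sorted_perm _ _ _)
          _ = m := List.take_append_drop j m
      · rw [List.pairwise_append]
        refine ⟨htpw, ?_, hcross⟩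
        have := PySem.List.sorted_pairwise (xs := m.drop j) (key := fun x => x)
        simpa using this
    -- the tail of the sorted list is nonempty and its head is < m[j]
    have hdropne : m.drop j ≠ [] := by
      have : (m.drop j).length = m.length - j := List.length_drop
      intro hcon; rw [hcon] at this; simp at this; omega
    have hsne : PySem.List.sorted (m.drop j) (fun x => x) ≠ [] := by
      intro hcon
      exact hdropne ((PySem.List.sorted_eq_nil_iff _ _ _).mp hcon)
    obtain ⟨hd, tl, hhd⟩ := List.exists_cons_of_ne_nil hsne
    have hhdle : hd ≤ m.getD (j + 1) 0 := by
      have hmem : m.getD (j + 1) 0 ∈ m.drop j := by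
        rw [List.getD_eq_getElem m 0 (by omega)]
        have : m[j + 1] = (m.drop j)[1]'(by rw [List.length_drop]; omega) := by
          rw [List.getElem_drop]
        rw [this]
        exact List.getElem_mem _
      simpa using PySem.List.key_head_sorted_le _ _ hhd _ hmem
    have hslen : (PySem.List.sorted m (fun x => x)).length = m.length :=
      PySem.List.length_sorted _ _ _
    apply Eq.symm
    rw [show ((0 : Int) + j) = ((0 : Int) + j) from rfl]
    apply firstDiff_some j m (PySem.List.sorted m (fun x => x)) 0 (by omega) (by omega)
    · rw [hsorted]
      rw [List.getD_append_right _ _ _ _ (le_of_eq htke), htke, Nat.sub_self, hhd]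
      simp only [List.getD_cons_zero]
      intro hcon
      have : m.getD j 0 ≤ m.getD (j + 1) 0 := hcon ▸ hhdle
      omega
    · intro t ht
      have htt : (m.take j).getD t 0 = m.getD t 0 := by
        rw [List.getD_eq_getElem (m.take j) 0 (by rw [htke]; omega), List.getElem_take,
            List.getD_eq_getElem m 0 (by omega)]
      rw [hsorted, List.getD_append _ _ _ t (by rw [htke]; omega), htt]

-- ===== VERDICT (by name: the statement is the Claim_ definition above) =====
theorem solve_spec : Claim_equal_solve := by
  intro arr _
  unfold Spec_solve solve solve_alt
  simp only
  rw [filter_enumerate_even, filter_enumerate_odd]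
  rw [if_pos (show PySem.Int.mod 0 2 = 0 by decide), if_neg (show ¬ PySem.Int.mod 0 2 = 1 by decide)]
  set e := PySem.List.sorted (everyOther arr) (fun x => x) with he
  set o := PySem.List.sorted (everyOther (arr.drop 1)) (fun x => x) with ho
  have hle : e.length = (arr.length + 1) / 2 := by
    rw [he, PySem.List.length_sorted, length_everyOther]
  have hlo : o.length = arr.length / 2 := by
    rw [ho, PySem.List.length_sorted, length_everyOther]
    cases arr <;> simp
  have hA := loopEq e o arr.length hle hlo arr.length 0 (by omega)
  simp only [Nat.cast_zero, List.drop_zero] at hA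
  rw [hA]
  have hperm : arr.Perm (interleave e o) := by
    have h1 : (interleave e o).Perm (e ++ o) := interleave_perm_append e o
    have h2 : (e ++ o).Perm (everyOther arr ++ everyOther (arr.drop 1)) :=
      List.Perm.append (PySem.List.sorted_perm _ _ _) (PySem.List.sorted_perm _ _ _)
    exact ((h1.trans h2).trans (everyOther_perm arr)).symm
  rw [PySem.List.sorted_eq_sorted_of_perm arr (interleave e o) (fun x => x)
        (fun a b hab => hab) hperm]
  apply scanAdj_eq_firstDiff e o
  · rw [he]; exact PySem.List.sorted_pairwise _ _
  · rw [ho]; exact PySem.List.sorted_pairwise _ _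
  · omega
  · omega
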